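-- pv_equiv track=rewrite | github.com/ilyxa-banchichi/iu7-compilers_construction | lab2/core/left_factoring.py | group_prefixes
-- ===== SOURCE A (Python) =====
-- from collections import defaultdict
-- from itertools import groupby
-- from typing import List
--
-- def group_prefixes(rhs_list: List[List[str]]) -> dict:
--     prefix_groups = defaultdict(list)
--
--     rhs_list.sort()
--     for _, group in groupby(rhs_list, key=lambda x: x[0] if x else ''):
--         group = list(group)
--         if len(group) == 1:
--             prefix_groups[tuple(group[0])].append(group[0])
--         else:
--             prefix = longest_common_prefix(group)
--             prefix_groups[tuple(prefix)].extend(group)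
--
--     return dict(prefix_groups)
--
-- def longest_common_prefix(sequences: List[List[str]]) -> List[str]:
--     if not sequences:
--         return []
--
--     min_len = min(len(seq) for seq in sequences)
--     prefix = []
--
--     for i in range(min_len):
--         current = sequences[0][i]
--         if all(seq[i] == current for seq in sequences):
--             prefix.append(current)
--         else:
--             break
--
--     return prefix
-- ===== SOURCE B (Python) =====
-- # Single streaming pass over the sorted list: maintain the current run's key, a running
-- # common prefix (shrunk pairwise), and the collected sequences; flush on key change.
-- # Like A, mutates rhs_list in place via sort(); equivalence is about the return value.
-- def group_prefixes(rhs_list):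
--     prefix_groups = {}
--
--     rhs_list.sort()
--     state = None  # (run key, running common prefix, sequences of the run)
--     for seq in rhs_list:
--         k = seq[0] if seq else ''
--         if state is not None and state[0] == k:
--             key, prefix, run = state
--             state = (key, _common2(prefix, seq), run + [seq])
--         else:
--             _flush(prefix_groups, state)
--             state = (k, list(seq), [seq])
--     _flush(prefix_groups, state)
--
--     return prefix_groups
--
--
-- def _flush(prefix_groups, state):
--     if state is not None:
--         _, prefix, run = state
--         prefix_groups.setdefault(tuple(prefix), []).extend(run)
--
--
-- def _common2(p, s):
--     out = []
--     for a, b in zip(p, s):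
--         if a != b:
--             break
--         out.append(a)
--     return out
-- ===== Notes on version B (the rewrite author's own statement) =====
-- stated objective: alternative
-- what changed: Replaced groupby + a separate indexed longest_common_prefix helper (with a singleton special case) by one streaming pass over the sorted list that maintains the current run's key, its sequences and a running common prefix folded pairwise, flushing on key change.
import Mathlib
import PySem

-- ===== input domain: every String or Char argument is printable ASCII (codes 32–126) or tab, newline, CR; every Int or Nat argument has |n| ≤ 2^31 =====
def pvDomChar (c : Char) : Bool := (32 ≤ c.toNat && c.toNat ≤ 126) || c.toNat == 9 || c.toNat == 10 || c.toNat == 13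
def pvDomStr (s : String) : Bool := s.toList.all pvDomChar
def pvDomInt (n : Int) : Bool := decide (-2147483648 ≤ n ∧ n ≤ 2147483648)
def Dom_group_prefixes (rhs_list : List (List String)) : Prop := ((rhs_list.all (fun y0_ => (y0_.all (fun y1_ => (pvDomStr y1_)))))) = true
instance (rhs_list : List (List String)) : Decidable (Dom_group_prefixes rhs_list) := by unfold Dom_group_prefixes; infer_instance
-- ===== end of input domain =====

-- B replaces A's groupby + per-group longest_common_prefix (and its singleton special case)
-- by one streaming pass that folds the common prefix pairwise while the run is collected.
-- Both Pythons mutate rhs_list in place via sort(); the equivalence is about the return value.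

-- ===== PORT A =====

-- 'x[0] if x else ""' (the groupby key)
def pvKey (x : List String) : String := x.headD ""

-- the 'for i in range(min_len)' loop of longest_common_prefix, with its break;
-- first.getD i "" is sequences[0][i] (always in range: i < min_len ≤ every length)
def pvLcpScan (seqs : List (List String)) (first : List String) (stop : Nat)
    (i : Nat) (acc : List String) : List String :=
  if _h : i < stop then
    let current := first.getD i ""
    if seqs.all (fun s => s.getD i "" == current) then
      pvLcpScan seqs first stop (i + 1) (acc ++ [current])
    else acc
  else acc
termination_by stop - i

def longest_common_prefix (sequences : List (List String)) : List String :=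
  match sequences with
  | [] => []
  | s :: rest =>
    -- min(len(seq) for seq in sequences): min over a nonempty list as the running-min loop
    let minLen := (rest.map List.length).foldl min s.length
    pvLcpScan (s :: rest) s minLen 0 []

-- itertools.groupby on the sorted list: maximal runs of equal key, in order
def pvGroupsA (l : List (List String)) : List (List (List String)) :=
  match l with
  | [] => []
  | x :: xs =>
    (x :: xs.takeWhile (fun y => pvKey y == pvKey x))
      :: pvGroupsA (xs.dropWhile (fun y => pvKey y == pvKey x))
termination_by l.length
decreasing_by
  simp only [List.length_cons]
  exact Nat.lt_succ_of_le (List.length_dropWhile_le _ _)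

-- the loop body: defaultdict(list) append / extend = Dict.modify _ [] (· ++ _)
def pvEmitA (d : PySem.Dict (List String) (List (List String))) (g : List (List String)) :
    PySem.Dict (List String) (List (List String)) :=
  if g.length == 1 then
    d.modify (g.headD []) [] (· ++ [g.headD []])
  else
    let prefix_ := longest_common_prefix g
    d.modify prefix_ [] (· ++ g)

def group_prefixes (rhs_list : List (List String)) : List (List String × List (List String)) :=
  ((pvGroupsA (PySem.List.sorted rhs_list (fun x => x) false)).foldl pvEmitA
      PySem.Dict.empty).items

-- ===== PORT B =====

-- _common2: the zip loop with break = structural recursion on both lists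
def pvCp : List String → List String → List String
  | a :: as, b :: bs => if a == b then a :: pvCp as bs else []
  | _, _ => []

-- _flush
def pvFlush (d : PySem.Dict (List String) (List (List String)))
    (st : Option (String × List String × List (List String))) :
    PySem.Dict (List String) (List (List String)) :=
  match st with
  | none => d
  | some (_, p, run) => d.modify p [] (· ++ run)   -- setdefault(...,[]).extend(run)

-- the body of B's single for-loop
def pvStep (s : PySem.Dict (List String) (List (List String)) ×
      Option (String × List String × List (List String))) (seq : List String) :
    PySem.Dict (List String) (List (List String)) ×
      Option (String × List String × List (List String)) :=
  let k := seq.headD ""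
  match s.2 with
  | some (key, p, run) =>
    if k == key then (s.1, some (key, pvCp p seq, run ++ [seq]))
    else (pvFlush s.1 s.2, some (k, seq, [seq]))
  | none => (s.1, some (k, seq, [seq]))

def group_prefixes_alt (rhs_list : List (List String)) :
    List (List String × List (List String)) :=
  let st := (PySem.List.sorted rhs_list (fun x => x) false).foldl pvStep
      (PySem.Dict.empty, none)
  (pvFlush st.1 st.2).items

-- ===== PRECONDITION & SPEC =====
def Spec_group_prefixes (rhs_list : List (List String)) (out : List (List String × List (List String))) : Prop := out = group_prefixes_alt rhs_list
instance (rhs_list : List (List String)) (out : List (List String × List (List String))) : Decidable (Spec_group_prefixes rhs_list out) := by unfold Spec_group_prefixes; infer_instance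

-- ===== CLAIM (what is proved, stated in full; the proofs are below) =====
def Claim_equal_group_prefixes : Prop := ∀ (rhs_list : List (List String)), Dom_group_prefixes rhs_list → Spec_group_prefixes rhs_list (group_prefixes rhs_list)


-- ===== LEMMAS AND PROOFS =====

-- basic facts about B's pairwise common prefix -----------------------------

theorem pvCp_prefix_left : ∀ a b : List String, pvCp a b <+: a := by
  intro a
  induction a with
  | nil => intro b; cases b <;> simp [pvCp]
  | cons x xs ih =>
    intro b
    cases b with
    | nil => simp [pvCp]
    | cons y ys =>
      by_cases h : x == y
      · simpa [pvCp, h] using ih ys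
      · simp [pvCp, h]

theorem pvCp_prefix_right : ∀ a b : List String, pvCp a b <+: b := by
  intro a
  induction a with
  | nil => intro b; cases b <;> simp [pvCp]
  | cons x xs ih =>
    intro b
    cases b with
    | nil => simp [pvCp]
    | cons y ys =>
      by_cases h : x == y
      · have hxy : x = y := by simpa using h
        subst hxy
        simpa [pvCp, h] using ih ys
      · simp [pvCp, h]

theorem pvCp_greatest : ∀ c a b : List String, c <+: a → c <+: b → c <+: pvCp a b := by
  intro c
  induction c with
  | nil => intro a b _ _; exact List.nil_prefix
  | cons z zs ih =>
    intro a b ha hb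
    obtain ⟨ta, rfl⟩ := ha
    obtain ⟨tb, rfl⟩ := hb
    simp only [List.cons_append, pvCp, beq_self_eq_true, if_true]
    exact (List.cons_prefix_cons).2 ⟨rfl, ih _ _ ⟨ta, rfl⟩ ⟨tb, rfl⟩⟩

-- the fold of pvCp over a run is its greatest common prefix ----------------

theorem foldl_pvCp_isCP : ∀ (t : List (List String)) (x : List String),
    t.foldl pvCp x <+: x ∧ ∀ s ∈ t, t.foldl pvCp x <+: s := by
  intro t
  induction t with
  | nil => intro x; exact ⟨List.prefix_refl x, by simp⟩
  | cons b t' ih =>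
    intro x
    obtain ⟨h1, h2⟩ := ih (pvCp x b)
    refine ⟨h1.trans (pvCp_prefix_left x b), ?_⟩
    intro s hs
    rcases List.mem_cons.1 hs with rfl | hs
    · exact h1.trans (pvCp_prefix_right x s)
    · exact h2 s hs

theorem foldl_pvCp_greatest : ∀ (t : List (List String)) (x c : List String),
    c <+: x → (∀ s ∈ t, c <+: s) → c <+: t.foldl pvCp x := by
  intro t
  induction t with
  | nil => intro x c hx _; exact hx
  | cons b t' ih =>
    intro x c hx h
    exact ih _ _ (pvCp_greatest c x b hx (h b (by simp))) fun s hs => h s (by simp [hs])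

-- small list facts used by the scan characterisation -----------------------

theorem pvPrefix_getD (c s : List String) (h : c <+: s) (j : Nat) (hj : j < c.length) :
    s.getD j "" = c.getD j "" := by
  obtain ⟨t, rfl⟩ := h
  rw [List.getD_eq_getElem _ _ (by simp; omega), List.getD_eq_getElem _ _ hj]
  exact List.getElem_append_left hj

theorem pvTake_eq_of_agree (a b : List String) (i : Nat) (ha : i ≤ a.length)
    (hb : i ≤ b.length) (h : ∀ j, j < i → a.getD j "" = b.getD j "") :
    a.take i = b.take i := by
  apply List.ext_getElem (by simp [ha, hb])
  intro j h1 h2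
  have hja : j < a.length := by simp at h1; omega
  have hjb : j < b.length := by simp at h2; omega
  have := h j (by simp at h1; omega)
  rw [List.getD_eq_getElem _ _ hja, List.getD_eq_getElem _ _ hjb] at this
  simpa [List.getElem_take] using this

theorem pvTake_append_getD (x : List String) (i : Nat) (h : i < x.length) :
    x.take i ++ [x.getD i ""] = x.take (i + 1) := by
  rw [List.getD_eq_getElem _ _ h, List.take_add_one, List.getElem?_eq_getElem h]
  rfl

-- characterisation of A's indexed scan --------------------------------------

theorem pvLcpScan_spec (seqs : List (List String)) (x : List String) (m : Nat)
    (hmx : m ≤ x.length) :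
    ∀ (fuel i : Nat) (acc : List String), m - i ≤ fuel → acc = x.take i → i ≤ m →
      (∀ j, j < i → ∀ s ∈ seqs, s.getD j "" = x.getD j "") →
      ∃ i', pvLcpScan seqs x m i acc = x.take i' ∧ i' ≤ m ∧
        (∀ j, j < i' → ∀ s ∈ seqs, s.getD j "" = x.getD j "") ∧
        (i' = m ∨ ∃ s ∈ seqs, ¬ s.getD i' "" = x.getD i' "") := by
  intro fuel
  induction fuel with
  | zero =>
    intro i acc hfuel hacc him hagree
    have him' : i = m := by omega
    rw [pvLcpScan]
    simp only [him', lt_irrefl, dif_neg, not_false_iff]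
    exact ⟨m, by simpa [him'] using hacc, le_refl m, by simpa [him'] using hagree, Or.inl rfl⟩
  | succ fuel ih =>
    intro i acc hfuel hacc him hagree
    rw [pvLcpScan]
    by_cases hi : i < m
    · simp only [hi, dif_pos]
      by_cases hall : seqs.all (fun s => s.getD i "" == x.getD i "") = true
      · simp only [hall, if_pos]
        have hix : i < x.length := lt_of_lt_of_le hi hmx
        have hacc' : acc ++ [x.getD i ""] = x.take (i + 1) := by
          rw [hacc]; exact pvTake_append_getD x i hix
        refine ih (i + 1) (acc ++ [x.getD i ""]) (by omega) hacc' (by omega) ?_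
        intro j hj s hs
        rcases Nat.lt_or_ge j i with hj' | hj'
        · exact hagree j hj' s hs
        · have : j = i := by omega
          subst this
          have := (List.all_eq_true.1 hall) s hs
          simpa using this
      · simp only [hall]
        simp only [Bool.false_eq_true, if_false]
        refine ⟨i, hacc, le_of_lt hi, hagree, Or.inr ?_⟩
        simp only [List.all_eq_true, not_forall] at hall
        obtain ⟨s, hs, hne⟩ := hall
        exact ⟨s, hs, by simpa using hne⟩
    · have him' : i = m := by omega
      simp only [hi, dif_neg, not_false_iff]
      exact ⟨m, by simpa [him'] using hacc, le_refl m, by simpa [him'] using hagree, Or.inl rfl⟩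

-- A's longest_common_prefix equals B's fold of pairwise prefixes ------------

theorem pvLcp_eq_foldl (x : List String) (t : List (List String)) :
    longest_common_prefix (x :: t) = t.foldl pvCp x := by
  have hmin := PySem.List.foldl_min_le (t.map List.length) x.length
  set m := (t.map List.length).foldl min x.length
  have hmSeqs : ∀ s ∈ x :: t, m ≤ s.length := by
    intro s hs
    rcases List.mem_cons.1 hs with rfl | hs
    · exact hmin.1
    · exact hmin.2 _ (List.mem_map_of_mem hs)
  have hmx : m ≤ x.length := hmSeqs x (by simp)
  -- m is the length of some member of the run
  have hmem : m = x.length ∨ m ∈ t.map List.length := PySem.List.foldl_min_mem _ _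
  obtain ⟨i', hscan, hi'm, hagree, hlast⟩ :=
    pvLcpScan_spec (x :: t) x m hmx m 0 [] (by omega) (by simp) (by omega)
      (by intro j hj; omega)
  have hres : longest_common_prefix (x :: t) = x.take i' := by
    simpa [longest_common_prefix] using hscan
  -- the scan's result is a common prefix of every sequence of the run
  have hCP : ∀ s ∈ x :: t, x.take i' <+: s := by
    intro s hs
    have : x.take i' = s.take i' := by
      refine pvTake_eq_of_agree x s i' (le_trans hi'm hmx) (le_trans hi'm (hmSeqs s hs)) ?_
      intro j hj
      exact (hagree j hj s hs).symm
    rw [this]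
    exact List.take_prefix i' s
  -- and every common prefix of the run is a prefix of the scan's result
  have hGreat : ∀ c : List String, (∀ s ∈ x :: t, c <+: s) → c <+: x.take i' := by
    intro c hc
    have hcm : c.length ≤ m := by
      rcases hmem with hx' | hmem
      · rw [hx']; exact (hc x (by simp)).length_le
      · obtain ⟨s, hs, hlen⟩ := List.mem_map.1 hmem
        rw [← hlen]; exact (hc s (by simp [hs])).length_le
    have hci : c.length ≤ i' := by
      by_contra hlt0
      have hlt : i' < c.length := by omega
      rcases hlast with rfl | ⟨s, hs, hne⟩
      · omega
      · have h1 : s.getD i' "" = c.getD i' "" := pvPrefix_getD c s (hc s hs) i' hlt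
        have h2 : x.getD i' "" = c.getD i' "" := pvPrefix_getD c x (hc x (by simp)) i' hlt
        exact hne (h1.trans h2.symm)
    refine List.prefix_of_prefix_length_le (hc x (by simp)) (List.take_prefix i' x) ?_
    simpa [min_eq_left (le_trans hi'm hmx)] using hci
  rw [hres]
  -- antisymmetry of the prefix order
  have h1 : x.take i' <+: t.foldl pvCp x := by
    refine foldl_pvCp_greatest t x _ (hCP x (by simp)) ?_
    intro s hs; exact hCP s (by simp [hs])
  have h2 : t.foldl pvCp x <+: x.take i' := by
    obtain ⟨ha, hb⟩ := foldl_pvCp_isCP t x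
    refine hGreat _ ?_
    intro s hs
    rcases List.mem_cons.1 hs with rfl | hs
    · exact ha
    · exact hb s hs
  exact (h2.eq_of_length_le h1.length_le).symm

-- A's group emission equals B's run flush -----------------------------------

theorem pvEmitA_eq (d : PySem.Dict (List String) (List (List String)))
    (x : List String) (t : List (List String)) :
    pvEmitA d (x :: t) = d.modify (t.foldl pvCp x) [] (· ++ (x :: t)) := by
  cases t with
  | nil => simp [pvEmitA]
  | cons b t' =>
    have hlen : ((x :: b :: t').length == 1) = false := by simp
    simp only [pvEmitA, hlen, Bool.false_eq_true, if_false]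
    rw [pvLcp_eq_foldl]

-- B's loop over a run with a constant key accumulates the run ---------------

theorem pvRun_fold (k : String) : ∀ (run : List (List String)),
    (∀ y ∈ run, pvKey y = k) →
    ∀ (d : PySem.Dict (List String) (List (List String))) (p : List String)
      (r : List (List String)),
    run.foldl pvStep (d, some (k, p, r)) = (d, some (k, run.foldl pvCp p, r ++ run)) := by
  intro run
  induction run with
  | nil => intro _ d p r; simp
  | cons y run' ih =>
    intro hk d p r
    have hy : y.headD "" = k := hk y (by simp)
    simp only [List.foldl_cons]
    have hstep : pvStep (d, some (k, p, r)) y = (d, some (k, pvCp p y, r ++ [y])) := by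
      simp only [pvStep]
      rw [hy]
      simp
    rw [hstep, ih (fun z hz => hk z (by simp [hz]))]
    simp

-- B's streaming pass equals A's groupby-and-emit loop -----------------------

theorem pvStream_eq : ∀ (n : Nat) (l : List (List String)), l.length ≤ n →
    ∀ d : PySem.Dict (List String) (List (List String)),
    pvFlush (l.foldl pvStep (d, none)).1 (l.foldl pvStep (d, none)).2 =
      (pvGroupsA l).foldl pvEmitA d := by
  intro n
  induction n with
  | zero =>
    intro l hl d
    have : l = [] := List.length_eq_zero_iff.1 (by omega)
    subst this
    simp [pvGroupsA, pvFlush]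
  | succ n ih =>
    intro l hl d
    cases l with
    | nil => simp [pvGroupsA, pvFlush]
    | cons x xs =>
      set p : List String → Bool := fun y => pvKey y == pvKey x with hp
      set run := xs.takeWhile p with hrun
      set rest := xs.dropWhile p with hrest
      have hsplit : xs = run ++ rest := (List.takeWhile_append_dropWhile).symm
      have hkrun : ∀ y ∈ run, pvKey y = pvKey x := by
        intro y hy
        have := List.mem_takeWhile_imp hy
        simpa [hp] using this
      have hstep0 : pvStep (d, none) x = (d, some (pvKey x, x, [x])) := by
        simp [pvStep, pvKey]
      have hfold : (x :: xs).foldl pvStep (d, none) =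
          rest.foldl pvStep (d, some (pvKey x, run.foldl pvCp x, x :: run)) := by
        conv_lhs => rw [List.foldl_cons, hstep0, hsplit]
        rw [List.foldl_append, pvRun_fold (pvKey x) run hkrun d x [x]]
        rfl
      have hgroups : pvGroupsA (x :: xs) = (x :: run) :: pvGroupsA rest := by
        rw [pvGroupsA]
      cases hr : rest with
      | nil =>
        rw [hfold, hr]
        simp only [List.foldl_nil]
        rw [hgroups, hr]
        simp only [pvGroupsA, List.foldl_cons, List.foldl_nil]
        rw [pvEmitA_eq]
        rfl
      | cons y ys =>
        have hpy : p y = false := by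
          have hne : xs.dropWhile p ≠ [] := by rw [← hrest, hr]; simp
          have := List.head_dropWhile_not (p := p) (l := xs) hne
          simp only [← hrest, hr] at this
          simpa using this
        have hkey : (pvKey y == pvKey x) = false := by
          simp only [hp] at hpy
          exact hpy
        have hstepy : pvStep (d, some (pvKey x, run.foldl pvCp x, x :: run)) y =
            (pvFlush d (some (pvKey x, run.foldl pvCp x, x :: run)),
              some (pvKey y, y, [y])) := by
          simp only [pvStep, show y.headD "" = pvKey y from rfl, hkey]
          rfl
        have hstepN : ∀ (d' : PySem.Dict (List String) (List (List String)))
            (z : List String), pvStep (d', none) z = (d', some (pvKey z, z, [z])) := by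
          intro d' z
          simp [pvStep, pvKey]
        set d2 := pvFlush d (some (pvKey x, run.foldl pvCp x, x :: run)) with hd2
        have hfold2 : (x :: xs).foldl pvStep (d, none) =
            (y :: ys).foldl pvStep (d2, none) := by
          rw [hfold, hr, List.foldl_cons, hstepy, List.foldl_cons, hstepN d2 y]
        have hlen : (y :: ys).length ≤ n := by
          have h1 : rest.length ≤ xs.length := hrest ▸ List.length_dropWhile_le p xs
          have h2 : xs.length ≤ n := by simpa using hl
          rw [← hr]; omega
        rw [hfold2, ih (y :: ys) hlen d2, hgroups, hr, List.foldl_cons]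
        congr 1
        rw [hd2, pvEmitA_eq]
        rfl

-- ===== VERDICT (by name: the statement is the Claim_ definition above) =====
theorem group_prefixes_spec : Claim_equal_group_prefixes := by
  intro rhs_list _
  unfold Spec_group_prefixes group_prefixes group_prefixes_alt
  set ls := PySem.List.sorted rhs_list (fun x => x) false with hls
  have := pvStream_eq ls.length ls (le_refl _) PySem.Dict.empty
  simp only [← this]
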